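-- pv_equiv track=rewrite | github.com/NPGrant81/fantasy-football-pi | backend/scripts/load_mfl_html_normalized.py | _single_str_from_rows
-- ===== SOURCE A (Python) =====
-- from typing import Any
--
-- def _single_str_from_rows(rows: list[dict[str, Any]], key: str) -> str | None:
--     values = {
--         text
--         for row in rows
--         if (text := str(row.get(key) or "").strip())
--     }
--     if len(values) == 1:
--         return values.pop()
--     return None
-- ===== SOURCE B (Python) =====
-- from typing import Any
--
-- def _single_str_from_rows(rows: list[dict[str, Any]], key: str) -> str | None:
--     candidate = None
--     seen = False
--     for row in rows:
--         text = str(row.get(key) or "").strip()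
--         if not text:
--             continue
--         if not seen:
--             candidate = text
--             seen = True
--         elif text != candidate:
--             return None
--     return candidate if seen else None
-- ===== Notes on version B (the rewrite author's own statement) =====
-- stated objective: simpler
-- what changed: Replaces the set comprehension plus cardinality check with one explicit pass maintaining a scalar candidate and a seen flag, returning None immediately on the second distinct non-empty value.
import Mathlib
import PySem

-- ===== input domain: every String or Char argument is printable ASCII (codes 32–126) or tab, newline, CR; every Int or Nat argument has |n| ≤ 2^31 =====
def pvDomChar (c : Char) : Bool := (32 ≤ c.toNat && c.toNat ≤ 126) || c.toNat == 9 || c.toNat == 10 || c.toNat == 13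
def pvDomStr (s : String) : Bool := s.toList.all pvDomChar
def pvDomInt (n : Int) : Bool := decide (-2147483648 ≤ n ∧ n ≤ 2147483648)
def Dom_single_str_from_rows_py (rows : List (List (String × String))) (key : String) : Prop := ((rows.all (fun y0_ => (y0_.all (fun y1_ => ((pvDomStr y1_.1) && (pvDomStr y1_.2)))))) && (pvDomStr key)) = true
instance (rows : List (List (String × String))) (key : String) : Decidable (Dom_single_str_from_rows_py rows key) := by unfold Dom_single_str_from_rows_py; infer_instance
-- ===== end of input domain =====

-- B replaces A's set comprehension + cardinality check by a single explicit pass keeping a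
-- scalar candidate with early exit on the second distinct value (objective: simpler).

-- shared helper: text = str(row.get(key) or "").strip()  (row.get → None/"" both give "")
def pvTextOf (row : List (String × String)) (key : String) : String :=
  PySem.Str.strip ((PySem.Dict.mk row).getD key "")

-- comprehension step: add text to the set when non-empty (shared with the proof's pvAFrom)
def pvStep (key : String) (s : PySem.Set String) (row : List (String × String)) : PySem.Set String :=
  let text := pvTextOf row key
  if text ≠ "" then PySem.Set.add s text else s

-- ===== PORT A =====
-- values = {text for row in rows if (text := str(row.get(key) or '').strip())}
-- if len(values) == 1: return values.pop()  (pop of a singleton set is its element)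
def single_str_from_rows_py (rows : List (List (String × String))) (key : String) : Option String :=
  let values : PySem.Set String := rows.foldl (pvStep key) PySem.Set.empty
  if PySem.Set.len values = 1 then values.head? else none

-- ===== PORT B =====
-- explicit loop maintaining candidate/seen (cand = none ↔ not seen; early return none on conflict)
def pvAltLoop (rows : List (List (String × String))) (key : String) (cand : Option String) : Option String :=
  match rows with
  | [] => cand
  | row :: rest =>
    let text := pvTextOf row key
    if text = "" then pvAltLoop rest key cand
    else
      match cand with
      | none => pvAltLoop rest key (some text)
      | some c => if text = c then pvAltLoop rest key (some c) else none

def single_str_from_rows_py_alt (rows : List (List (String × String))) (key : String) : Option String :=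
  pvAltLoop rows key none

-- ===== PRECONDITION & SPEC =====
def Spec_single_str_from_rows_py (rows : List (List (String × String))) (key : String) (out : Option String) : Prop := out = single_str_from_rows_py_alt rows key
instance (rows : List (List (String × String))) (key : String) (out : Option String) : Decidable (Spec_single_str_from_rows_py rows key out) := by unfold Spec_single_str_from_rows_py; infer_instance

-- ===== CLAIM (what is proved, stated in full; the proofs are below) =====
def Claim_equal_single_str_from_rows_py : Prop := ∀ (rows : List (List (String × String))) (key : String), Dom_single_str_from_rows_py rows key → Spec_single_str_from_rows_py rows key (single_str_from_rows_py rows key)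

-- ===== LEMMAS AND PROOFS =====

-- A's result computed from an arbitrary intermediate set s
def pvAFrom (rows : List (List (String × String))) (key : String) (s : PySem.Set String) : Option String :=
  let v := rows.foldl (pvStep key) s
  if PySem.Set.len v = 1 then v.head? else none

theorem pvAFrom_spec (key : String) (rows : List (List (String × String))) :
    single_str_from_rows_py rows key = pvAFrom rows key PySem.Set.empty := rfl

theorem len_add_ge (s : PySem.Set String) (x : String) :
    s.length ≤ (PySem.Set.add s x).length := by
  simp only [PySem.Set.add]
  split <;> simp

theorem len_foldl_ge (key : String) (rows : List (List (String × String)))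
    (s : PySem.Set String) :
    s.length ≤ (rows.foldl (pvStep key) s).length := by
  induction rows generalizing s with
  | nil => simp
  | cons row rest ih =>
    simp only [List.foldl_cons]
    refine le_trans ?_ (ih _)
    simp only [pvStep]
    split
    · exact len_add_ge _ _
    · exact le_rfl

theorem pvAFrom_big (key : String) (rows : List (List (String × String)))
    (s : PySem.Set String) (h : 2 ≤ s.length) :
    pvAFrom rows key s = none := by
  unfold pvAFrom
  have := len_foldl_ge key rows s
  rw [if_neg]
  simp only [PySem.Set.len]
  omega

theorem pvAFrom_cons (key : String) (row : List (String × String))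
    (rest : List (List (String × String))) (s : PySem.Set String) :
    pvAFrom (row :: rest) key s = pvAFrom rest key (pvStep key s row) := rfl

theorem pvAFrom_eq_altLoop (key : String) (rows : List (List (String × String)))
    (cand : Option String) :
    pvAFrom rows key (match cand with | none => [] | some c => [c]) =
      pvAltLoop rows key cand := by
  induction rows generalizing cand with
  | nil =>
    cases cand <;> simp [pvAFrom, pvAltLoop, PySem.Set.len]
  | cons row rest ih =>
    simp only [pvAltLoop]
    rw [pvAFrom_cons]
    by_cases ht : pvTextOf row key = ""
    · rw [if_pos ht]
      have hs : pvStep key (match cand with | none => [] | some c => [c]) row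
          = (match cand with | none => [] | some c => [c]) := by
        simp [pvStep, ht]
      rw [hs]; exact ih cand
    · rw [if_neg ht]
      cases cand with
      | none =>
        have hs : pvStep key ([] : PySem.Set String) row = [pvTextOf row key] := by
          simp [pvStep, ht, PySem.Set.add, PySem.Set.contains]
        rw [hs]; exact ih (some (pvTextOf row key))
      | some c =>
        show pvAFrom rest key (pvStep key [c] row) =
          if pvTextOf row key = c then pvAltLoop rest key (some c) else none
        by_cases hc : pvTextOf row key = c
        · have hs : pvStep key ([c] : PySem.Set String) row = [c] := by
            simp [pvStep, PySem.Set.add, PySem.Set.contains, hc]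
          rw [hs, if_pos hc]; exact ih (some c)
        · have hs : pvStep key ([c] : PySem.Set String) row = [c, pvTextOf row key] := by
            simp [pvStep, ht, PySem.Set.add, PySem.Set.contains, hc]
          rw [hs, if_neg hc]
          exact pvAFrom_big key rest _ (by simp)

-- ===== VERDICT (by name: the statement is the Claim_ definition above) =====
theorem single_str_from_rows_py_spec : Claim_equal_single_str_from_rows_py := by
  intro rows key _
  show single_str_from_rows_py rows key = single_str_from_rows_py_alt rows key
  rw [pvAFrom_spec, single_str_from_rows_py_alt]
  exact pvAFrom_eq_altLoop key rows none
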